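-- pv_equiv track=rewrite | github.com/thakoreh/owasp-agentic-scanner | src/owasp_agentic_scanner/rules/privilege_abuse.py | _has_placeholder_word
-- ===== SOURCE A (Python) =====
-- def _has_placeholder_word(value: str) -> bool:
--     """Check if value contains placeholder words.
--
--     Args:
--         value: The credential value to check
--
--     Returns:
--         True if value contains placeholder words
--     """
--     placeholder_words = [
--         "your_",
--         "example",
--         "placeholder",
--         "changeme",
--         "replace",
--         "insert",
--         "paste",
--         "enter",
--         "todo",
--         "fixme",
--         "dummy",
--         "sample",
--         "put_",
--         "add_",
--         "set_",
--     ]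
--     value_lower = value.lower()
--
--     for placeholder in placeholder_words:
--         if placeholder in value_lower and (
--             value_lower.startswith(placeholder)
--             or f"_{placeholder}" in value_lower
--             or placeholder.endswith("_")
--         ):
--             return True
--     return False
-- ===== SOURCE B (Python) =====
-- def _has_placeholder_word(value: str) -> bool:
--     """Check if value contains placeholder words (single left-to-right position scan)."""
--     anywhere = ("your_", "put_", "add_", "set_")
--     anchored = ("example", "placeholder", "changeme", "replace", "insert",
--                 "paste", "enter", "todo", "fixme", "dummy", "sample")
--     v = value.lower()
--     for i in range(len(v)):
--         if any(v.startswith(w, i) for w in anywhere):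
--             return True
--         if (i == 0 or v[i - 1] == "_") and any(v.startswith(w, i) for w in anchored):
--             return True
--     return False
-- ===== Notes on version B (the rewrite author's own statement) =====
-- stated objective: alternative
-- what changed: Replaces A's loop over the 15 placeholder words with per-word substring membership and position tests by a single left-to-right scan over the string positions that tests word prefixes at each position (anchored words only at index 0 or after '_').
import Mathlib
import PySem

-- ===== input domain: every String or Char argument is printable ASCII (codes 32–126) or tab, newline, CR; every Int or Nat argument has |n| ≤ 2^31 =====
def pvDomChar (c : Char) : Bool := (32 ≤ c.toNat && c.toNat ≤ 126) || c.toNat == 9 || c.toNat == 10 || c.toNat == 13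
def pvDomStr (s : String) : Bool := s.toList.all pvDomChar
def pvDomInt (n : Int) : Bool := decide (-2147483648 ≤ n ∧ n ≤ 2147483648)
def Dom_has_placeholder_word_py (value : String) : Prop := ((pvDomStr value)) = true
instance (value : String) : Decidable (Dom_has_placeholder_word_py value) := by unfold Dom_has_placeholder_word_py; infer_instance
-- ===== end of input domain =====

-- B replaces A's per-word loop of membership/position checks by one left-to-right scan of
-- the string that tests word prefixes at each position (objective: alternative).

-- ===== PORT A =====
-- the literal placeholder word list of A, in A's order
def pvWordsA : List (List Char) :=
  ["your_".toList, "example".toList, "placeholder".toList, "changeme".toList,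
   "replace".toList, "insert".toList, "paste".toList, "enter".toList,
   "todo".toList, "fixme".toList, "dummy".toList, "sample".toList,
   "put_".toList, "add_".toList, "set_".toList]

-- A's for-loop with early return, word by word
def pvLoopA (v : List Char) : List (List Char) → Bool
  | [] => false
  | w :: ws =>
    if PySem.Chars.isIn w v &&
        (PySem.Chars.startswith v w || PySem.Chars.isIn ('_' :: w) v ||
          PySem.Chars.endswith w ['_']) then true
    else pvLoopA v ws

def has_placeholder_word_py (value : String) : Bool :=
  pvLoopA (PySem.Chars.lower value.toList) pvWordsA

-- ===== PORT B =====
def pvAnywhere : List (List Char) :=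
  ["your_".toList, "put_".toList, "add_".toList, "set_".toList]

def pvAnchored : List (List Char) :=
  ["example".toList, "placeholder".toList, "changeme".toList, "replace".toList,
   "insert".toList, "paste".toList, "enter".toList, "todo".toList,
   "fixme".toList, "dummy".toList, "sample".toList]

-- B's position scan: `anch` says whether the current position is 0 or preceded by '_'
def pvScan : List Char → Bool → Bool
  | [], _ => false
  | c :: rest, anch =>
    if pvAnywhere.any (fun w => PySem.Chars.startswith (c :: rest) w) then true
    else if anch && pvAnchored.any (fun w => PySem.Chars.startswith (c :: rest) w) then true
    else pvScan rest (c == '_')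

def has_placeholder_word_py_alt (value : String) : Bool :=
  pvScan (PySem.Chars.lower value.toList) true

-- ===== PRECONDITION & SPEC =====
def Spec_has_placeholder_word_py (value : String) (out : Bool) : Prop := out = has_placeholder_word_py_alt value
instance (value : String) (out : Bool) : Decidable (Spec_has_placeholder_word_py value out) := by unfold Spec_has_placeholder_word_py; infer_instance

-- ===== CLAIM (what is proved, stated in full; the proofs are below) =====
def Claim_equal_has_placeholder_word_py : Prop := ∀ (value : String), Dom_has_placeholder_word_py value → Spec_has_placeholder_word_py value (has_placeholder_word_py value)

-- ===== LEMMAS AND PROOFS =====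

-- characterization of B's scan
theorem pvScan_iff (l : List Char) (anch : Bool) :
    pvScan l anch = true ↔
      (∃ w ∈ pvAnywhere, w <:+: l) ∨
      (anch = true ∧ ∃ w ∈ pvAnchored, w <+: l) ∨
      (∃ w ∈ pvAnchored, ('_' :: w) <:+: l) := by
  induction l generalizing anch with
  | nil =>
    simp [pvScan, pvAnywhere, pvAnchored]
  | cons c rest ih =>
    rw [pvScan]
    constructor
    · intro h
      split_ifs at h with h1 h2
      · rcases List.any_eq_true.mp h1 with ⟨w, hw, hpre⟩
        exact Or.inl ⟨w, hw, ((PySem.Chars.startswith_iff _ _).mp hpre).isInfix⟩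
      · simp only [Bool.and_eq_true] at h2
        rcases List.any_eq_true.mp h2.2 with ⟨w, hw, hpre⟩
        exact Or.inr (Or.inl ⟨h2.1, w, hw, (PySem.Chars.startswith_iff _ _).mp hpre⟩)
      · rcases (ih _).mp h with h | ⟨hc, w, hw, hpre⟩ | ⟨w, hw, hinf⟩
        · rcases h with ⟨w, hw, hinf⟩
          exact Or.inl ⟨w, hw, hinf.trans (List.suffix_cons c rest).isInfix⟩
        · refine Or.inr (Or.inr ⟨w, hw, ?_⟩)
          have : c = '_' := by simpa using hc
          subst this
          exact (List.cons_prefix_cons.mpr ⟨rfl, hpre⟩ : _ <+: _).isInfix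
        · exact Or.inr (Or.inr ⟨w, hw, hinf.trans (List.suffix_cons c rest).isInfix⟩)
    · intro h
      split_ifs with h1 h2
      · rfl
      · rfl
      · apply (ih _).mpr
        rcases h with ⟨w, hw, hinf⟩ | ⟨ha, w, hw, hpre⟩ | ⟨w, hw, hinf⟩
        · rcases (List.infix_cons_iff).mp hinf with hpre | hinf'
          · exact absurd (List.any_eq_true.mpr ⟨w, hw, (PySem.Chars.startswith_iff _ _).mpr hpre⟩) (by simpa using h1)
          · exact Or.inl ⟨w, hw, hinf'⟩
        · exact absurd (by simp only [Bool.and_eq_true]; exact ⟨ha, List.any_eq_true.mpr ⟨w, hw, (PySem.Chars.startswith_iff _ _).mpr hpre⟩⟩) h2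
        · rcases (List.infix_cons_iff).mp hinf with hpre | hinf'
          · rcases List.cons_prefix_cons.mp hpre with ⟨hc, hpre'⟩
            exact Or.inr (Or.inl ⟨by simp [hc.symm], w, hw, hpre'⟩)
          · exact Or.inr (Or.inr ⟨w, hw, hinf'⟩)

-- A's loop is an existential over the word list
theorem pvLoopA_iff (v : List Char) (ws : List (List Char)) :
    pvLoopA v ws = true ↔
      ∃ w ∈ ws, (PySem.Chars.isIn w v &&
        (PySem.Chars.startswith v w || PySem.Chars.isIn ('_' :: w) v ||
          PySem.Chars.endswith w ['_'])) = true := by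
  induction ws with
  | nil => simp [pvLoopA]
  | cons w ws ih =>
    rw [pvLoopA]
    split_ifs with h
    · exact ⟨fun _ => ⟨w, List.mem_cons_self, h⟩, fun _ => rfl⟩
    · rw [ih]
      constructor
      · rintro ⟨u, hu, hc⟩
        exact ⟨u, List.mem_cons_of_mem _ hu, hc⟩
      · rintro ⟨u, hu, hc⟩
        rcases List.mem_cons.mp hu with rfl | hu'
        · exact absurd hc h
        · exact ⟨u, hu', hc⟩

-- per-word simplification of A's condition when the word does NOT end in '_'
theorem pvCondAnchored (v w : List Char) (hend : PySem.Chars.endswith w ['_'] = false) :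
    (PySem.Chars.isIn w v &&
      (PySem.Chars.startswith v w || PySem.Chars.isIn ('_' :: w) v ||
        PySem.Chars.endswith w ['_'])) = true ↔
      (w <+: v) ∨ (('_' :: w) <:+: v) := by
  simp only [hend, Bool.or_false, Bool.and_eq_true, Bool.or_eq_true,
    PySem.Chars.isIn_iff_infix, PySem.Chars.startswith_iff]
  constructor
  · rintro ⟨_, h | h⟩
    · exact Or.inl h
    · exact Or.inr h
  · rintro (h | h)
    · exact ⟨h.isInfix, Or.inl h⟩
    · exact ⟨(List.suffix_cons '_' w).isInfix.trans h, Or.inr h⟩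

-- per-word simplification of A's condition when the word ends in '_'
theorem pvCondAnywhere (v w : List Char) (hend : PySem.Chars.endswith w ['_'] = true) :
    (PySem.Chars.isIn w v &&
      (PySem.Chars.startswith v w || PySem.Chars.isIn ('_' :: w) v ||
        PySem.Chars.endswith w ['_'])) = true ↔ w <:+: v := by
  simp [hend, PySem.Chars.isIn_iff_infix]

-- ===== VERDICT (by name: the statement is the Claim_ definition above) =====
theorem has_placeholder_word_py_spec : Claim_equal_has_placeholder_word_py := by
  intro value _
  unfold Spec_has_placeholder_word_py has_placeholder_word_py has_placeholder_word_py_alt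
  set l := PySem.Chars.lower value.toList with hl
  rw [Bool.eq_iff_iff, pvLoopA_iff, pvScan_iff]
  constructor
  · rintro ⟨w, hw, hcond⟩
    fin_cases hw <;> first
      | (exact Or.inl ⟨_, by decide, (pvCondAnywhere _ _ (by decide)).mp hcond⟩)
      | (rcases (pvCondAnchored _ _ (by decide)).mp hcond with h | h
         · exact Or.inr (Or.inl ⟨rfl, _, by decide, h⟩)
         · exact Or.inr (Or.inr ⟨_, by decide, h⟩))
  · rintro (⟨w, hw, h⟩ | ⟨_, w, hw, h⟩ | ⟨w, hw, h⟩)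
    · fin_cases hw <;>
        exact ⟨_, by decide, (pvCondAnywhere _ _ (by decide)).mpr h⟩
    · fin_cases hw <;>
        exact ⟨_, by decide, (pvCondAnchored _ _ (by decide)).mpr (Or.inl h)⟩
    · fin_cases hw <;>
        exact ⟨_, by decide, (pvCondAnchored _ _ (by decide)).mpr (Or.inr h)⟩
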